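-- pv_equiv track=rewrite | github.com/isaac-altair/CSC108-Introduction-to-Computer-Programming | a2.py | encipher
-- ===== SOURCE A (Python) =====
-- def encipher(plaintext, group_length, coding_char_to_ciphered_char):
--     '''(str, int, dict of str to str) -> str
--
--     '''
--     group_length = abs(int(group_length))
--     ### STAGE 1: Add the string STOP to the end of the plaintext
--     new_text = plaintext + 'STOP'
--     ### STAGE 2: Pad the result of stage 1 with spaces so that it is a multiple of n
--     if group_length != 0:
--         result_remainder = len(new_text) % abs(group_length)   #Find the remaining number result_remainder which equals to len(new_text)mod(group_length)
--         if result_remainder != 0: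
--             new_text = new_text + (abs(group_length) - result_remainder) * ' '   #Pad the result of stage 1 with spaces so that new_text is a multiple of n, where n = group_length
--         ### STAGE 3: Group the plaintext in to groups of n and reverse each group
--         mothership_list = []
--         babyship_list = []
--         for letter in new_text:
--             babyship_list.append(letter)
--             if len(babyship_list) == group_length:   #Check if the length of the babyship_list equals to the group length
--                 mothership_list.append(babyship_list)
--                 babyship_list = []   #Redeclare babyship_list as an empty list so we can run the for loop again until we run out of letter from new_text to iterate over
--         reversed_new_text = reverse_groups(mothership_list)   #Apply the reverse_groups function on the mothership_list
--     else:
--         reversed_new_text = new_text   #Do not run STAGE 2 and STAGE 3 operations on new_text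
--     ###STAGE 4: For each character in the reversed groups, replace each coding character with its corresponding ciphered character from the mapping pairs
--     enciphered_text = ''
--     for letter in reversed_new_text:
--         if letter in coding_char_to_ciphered_char.keys():
--             enciphered_text += coding_char_to_ciphered_char[letter]   #If letter is in the list of keys, then concatanate the values of coding_char_to_ciphered_char to the enciphered_text
--         else:
--             enciphered_text += letter
--     return enciphered_text
--
-- def reverse_groups(list_of_groups):
--     '''(list of [list of str]) -> str
--
--        Returns a string that contains the reversed groups of some text.
--        The original lists must remain unmodified.
--
--        >>> reverse_groups([['A', 'B', 'C'], ['D', 'E', 'F']])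
--        'CBAFED'
--
--     '''
--     output_string = ''
--     for sub_list in list_of_groups:
--         sub_list.reverse()   #Reverse elements in sub_list list
--         for letter in sub_list:
--             output_string += letter   #Concatanate each item letter from the list sub_list to the string output_string
--     return output_string
-- ===== SOURCE B (Python) =====
-- def encipher(plaintext, group_length, coding_char_to_ciphered_char):
--     n = abs(int(group_length))
--     new_text = plaintext + 'STOP'
--     if n == 0:
--         reversed_text = new_text
--     else:
--         new_text += ' ' * (-len(new_text) % n)
--         reversed_text = ''.join(new_text[i:i + n][::-1]
--                                 for i in range(0, len(new_text), n))
--     return ''.join(coding_char_to_ciphered_char.get(c, c) for c in reversed_text)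
-- ===== Notes on version B (the rewrite author's own statement) =====
-- stated objective: faster
-- what changed: Replaces the char-by-char accumulation into a list-of-lists plus the mutating reverse_groups helper (which builds the result by repeated string +=) with direct stride slicing (new_text[i:i+n][::-1] joined over range(0,len,n)), uniform '-len % n' padding, and a dict.get-based join for the substitution.
import Mathlib
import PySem

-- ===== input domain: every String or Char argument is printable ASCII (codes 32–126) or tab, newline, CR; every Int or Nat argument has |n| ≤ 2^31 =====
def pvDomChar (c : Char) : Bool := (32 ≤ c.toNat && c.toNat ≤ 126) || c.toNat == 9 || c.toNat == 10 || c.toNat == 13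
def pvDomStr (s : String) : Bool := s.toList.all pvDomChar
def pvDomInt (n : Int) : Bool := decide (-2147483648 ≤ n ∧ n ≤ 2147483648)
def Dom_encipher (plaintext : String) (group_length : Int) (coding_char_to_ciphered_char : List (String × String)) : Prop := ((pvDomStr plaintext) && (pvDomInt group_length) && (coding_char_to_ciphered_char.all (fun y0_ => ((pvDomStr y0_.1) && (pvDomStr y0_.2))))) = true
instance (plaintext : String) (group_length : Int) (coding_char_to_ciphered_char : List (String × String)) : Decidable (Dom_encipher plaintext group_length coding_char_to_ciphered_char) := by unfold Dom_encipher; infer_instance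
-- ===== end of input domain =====

-- B replaces A's char-by-char list-of-lists accumulation and the mutating reverse_groups
-- helper (repeated string +=) by stride slicing with [::-1] joined, and a dict.get join for the
-- substitution (measured faster in a timing run; return-value equivalence only).

-- ===== PORT A =====
-- one step of A's STAGE-3 loop: append the letter to babyship_list, flush when full
def pvGroupStep (n : Nat) (st : List (List Char) × List Char) (c : Char) : List (List Char) × List Char :=
  let b := st.2 ++ [c]
  if b.length = n then (st.1 ++ [b], []) else (st.1, b)

-- A's helper reverse_groups (in-place reverse of each sublist is caller-invisible here)
def pvReverseGroups (l : List (List Char)) : List Char :=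
  l.foldl (fun acc g => acc ++ g.reverse) []

def encipher (plaintext : String) (group_length : Int) (coding_char_to_ciphered_char : List (String × String)) : String :=
  let n := group_length.natAbs
  let new_text := plaintext.toList ++ "STOP".toList
  let reversed_new_text :=
    if n ≠ 0 then
      let result_remainder := new_text.length % n
      let new_text2 := if result_remainder ≠ 0 then new_text ++ List.replicate (n - result_remainder) ' ' else new_text
      pvReverseGroups (new_text2.foldl (pvGroupStep n) ([], [])).1
    else new_text
  String.ofList (reversed_new_text.foldl (fun acc c =>
      match PySem.Dict.get? (PySem.Dict.mk coding_char_to_ciphered_char) (String.ofList [c]) with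
      | some v => acc ++ v.toList
      | none => acc ++ [c]) [])

-- ===== PORT B =====
def encipher_alt (plaintext : String) (group_length : Int) (coding_char_to_ciphered_char : List (String × String)) : String :=
  let n := group_length.natAbs
  let new_text := plaintext.toList ++ "STOP".toList
  let reversed_text :=
    if n = 0 then new_text
    else
      let padded := new_text ++ List.replicate (PySem.Int.mod (-(new_text.length : Int)) n).toNat ' '
      ((PySem.List.pyRange 0 padded.length n).map
        (fun i => (PySem.List.slice padded (some i) (some (i + n))).reverse)).flatten
  String.ofList ((reversed_text.map (fun c =>
      (PySem.Dict.getD (PySem.Dict.mk coding_char_to_ciphered_char) (String.ofList [c]) (String.ofList [c])).toList)).flatten)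

-- ===== PRECONDITION & SPEC =====
def Spec_encipher (plaintext : String) (group_length : Int) (coding_char_to_ciphered_char : List (String × String)) (out : String) : Prop := out = encipher_alt plaintext group_length coding_char_to_ciphered_char
instance (plaintext : String) (group_length : Int) (coding_char_to_ciphered_char : List (String × String)) (out : String) : Decidable (Spec_encipher plaintext group_length coding_char_to_ciphered_char out) := by unfold Spec_encipher; infer_instance

-- ===== CLAIM (what is proved, stated in full; the proofs are below) =====
def Claim_equal_encipher : Prop := ∀ (plaintext : String) (group_length : Int) (coding_char_to_ciphered_char : List (String × String)), Dom_encipher plaintext group_length coding_char_to_ciphered_char → Spec_encipher plaintext group_length coding_char_to_ciphered_char (encipher plaintext group_length coding_char_to_ciphered_char)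

-- ===== LEMMAS AND PROOFS =====

-- reference decomposition into exact groups of n
def pvChunks (n : Nat) (l : List Char) : List (List Char) :=
  if h : l = [] ∨ n = 0 then [] else l.take n :: pvChunks n (l.drop n)
termination_by l.length
decreasing_by
  simp only [not_or] at h
  have h1 : 0 < l.length := List.length_pos_iff.mpr h.1
  have h2 : 0 < n := Nat.pos_of_ne_zero h.2
  simp [List.length_drop]; omega

lemma pvFold_chunk (n : Nat) (ms : List (List Char)) (b g : List Char)
    (h : b.length + g.length = n) (hg : g ≠ []) :
    g.foldl (pvGroupStep n) (ms, b) = (ms ++ [b ++ g], []) := by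
  induction g generalizing b ms with
  | nil => exact absurd rfl hg
  | cons c g' ih =>
    simp only [List.foldl_cons]
    cases g' with
    | nil =>
      have hb : (b ++ [c]).length = n := by simp at h ⊢; omega
      simp [pvGroupStep, hb]
    | cons d g'' =>
      have hb : ¬ (b ++ [c]).length = n := by simp at h ⊢; omega
      have := ih (b := b ++ [c]) (ms := ms) (by simp at h ⊢; omega) (by simp)
      simp only [pvGroupStep, if_neg hb] at *
      rw [this]; simp

lemma pvFold_groups (n : Nat) (hn : 0 < n) (m : Nat) (l : List Char)
    (h : l.length = m * n) (ms : List (List Char)) :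
    l.foldl (pvGroupStep n) (ms, []) = (ms ++ pvChunks n l, []) := by
  induction m generalizing l ms with
  | zero =>
    have : l = [] := List.length_eq_zero_iff.mp (by omega)
    subst this; simp [pvChunks]
  | succ m ih =>
    rw [Nat.succ_mul] at h
    have hl : l ≠ [] := by
      intro he; subst he; simp at h; omega
    have hlen : n ≤ l.length := by omega
    have htake : (l.take n).length = n := by simp [List.length_take]; omega
    have htne : l.take n ≠ [] := by
      intro he
      have := congrArg List.length he
      simp [htake] at this; omega
    conv_lhs => rw [← List.take_append_drop n l]
    rw [List.foldl_append, pvFold_chunk n ms [] (l.take n) (by simpa using htake) htne]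
    simp only [List.nil_append]
    rw [ih (l.drop n) (by simp [List.length_drop]; omega) (ms ++ [l.take n])]
    conv_rhs => rw [pvChunks]
    rw [dif_neg (by simp only [not_or]; exact ⟨hl, by omega⟩)]
    simp

lemma pvReverseGroups_eq (l : List (List Char)) :
    pvReverseGroups l = (l.map List.reverse).flatten := by
  unfold pvReverseGroups
  rw [PySem.List.foldl_append_eq_flatMap (g := List.reverse) l []]
  simp [List.flatMap_def]

lemma pvChunks_map (n : Nat) (hn : 0 < n) (m : Nat) (l : List Char) (h : l.length = m * n) :
    (List.range m).map (fun k => ((l.drop (n * k)).take n).reverse)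
      = (pvChunks n l).map List.reverse := by
  induction m generalizing l with
  | zero =>
    have : l = [] := List.length_eq_zero_iff.mp (by omega)
    subst this; simp [pvChunks]
  | succ m ih =>
    rw [Nat.succ_mul] at h
    have hl : l ≠ [] := by
      intro he; subst he; simp at h; omega
    conv_rhs => rw [pvChunks]
    rw [dif_neg (by simp only [not_or]; exact ⟨hl, by omega⟩)]
    rw [List.range_succ_eq_map]
    simp only [List.map_cons, List.map_map, Nat.mul_zero, List.drop_zero]
    congr 1
    rw [← ih (l.drop n) (by simp [List.length_drop]; omega)]
    apply List.map_congr_left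
    intro k _
    simp only [Function.comp_apply, List.drop_drop]
    have he : n * (k + 1) = n * k + n := by ring
    rw [he]
    have h2 : n * k + n = n + n * k := by ring
    rw [h2]

lemma pvSlices_eq (n : Nat) (hn : 0 < n) (m : Nat) (l : List Char) (h : l.length = m * n) :
    (PySem.List.pyRange 0 l.length n).map
        (fun i => (PySem.List.slice l (some i) (some (i + n))).reverse)
      = (pvChunks n l).map List.reverse := by
  rw [PySem.List.pyRange_of_pos 0 l.length (by exact_mod_cast hn)]
  have hn' : (0:Int) < n := by exact_mod_cast hn
  have hcnt : (if (0:Int) < l.length then (((l.length : Int) - 0 + n - 1) / n).toNat else 0) = m := by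
    by_cases hm0 : m = 0
    · subst hm0; simp at h; simp [h]
    · have hpos : (0:Int) < l.length := by
        have : 0 < l.length := by rw [h]; positivity
        exact_mod_cast this
      rw [if_pos hpos]
      have he : ((l.length : Int) - 0 + n - 1) = (n - 1) + m * n := by
        rw [h]; push_cast; ring
      rw [he, Int.add_mul_ediv_right _ _ (ne_of_gt hn'),
        Int.ediv_eq_zero_of_lt (by omega) (by omega)]
      simp
  rw [hcnt, List.map_map, ← pvChunks_map n hn m l h]
  apply List.map_congr_left
  intro k _
  simp only [Function.comp_apply, Int.zero_add]
  have hcast : (n : Int) * (k : Int) = ((n * k : Nat) : Int) := by push_cast; ring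
  rw [hcast, PySem.List.slice_natCast_add l (n * k) n]

lemma pvSubst_eq (d : List (String × String)) (l : List Char) :
    l.foldl (fun acc c =>
      match PySem.Dict.get? (PySem.Dict.mk d) (String.ofList [c]) with
      | some v => acc ++ v.toList
      | none => acc ++ [c]) []
    = (l.map (fun c =>
        (PySem.Dict.getD (PySem.Dict.mk d) (String.ofList [c]) (String.ofList [c])).toList)).flatten := by
  have hstep : ∀ (acc : List Char) (c : Char),
      (match PySem.Dict.get? (PySem.Dict.mk d) (String.ofList [c]) with
       | some v => acc ++ v.toList
       | none => acc ++ [c])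
      = acc ++ (PySem.Dict.getD (PySem.Dict.mk d) (String.ofList [c]) (String.ofList [c])).toList := by
    intro acc c
    rw [PySem.Dict.getD_eq_get?_getD]
    cases PySem.Dict.get? (PySem.Dict.mk d) (String.ofList [c]) with
    | some v => simp
    | none => simp [String.toList_ofList]
  simp only [hstep]
  rw [PySem.List.foldl_append_eq_flatMap]
  simp [List.flatMap_def]

lemma pvPad_eq (n L : Nat) (hn : 0 < n) :
    (PySem.Int.mod (-(L : Int)) n).toNat = (n - L % n) % n := by
  unfold PySem.Int.mod
  rw [Int.fmod_eq_emod_of_nonneg _ (by positivity)]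
  have key : (-(L:Int)) % n = ((n:Int) - (L:Int) % n) % n := by
    have h1 : -(L:Int) = -((L:Int) % n) + n * (-((L:Int) / n)) := by rw [Int.emod_def]; ring
    have h2 : (n:Int) - (L:Int) % n = -((L:Int) % n) + n * 1 := by ring
    rw [h1, h2, Int.add_mul_emod_self_left, Int.add_mul_emod_self_left]
  rw [key]
  have h2 : L % n < n := Nat.mod_lt _ hn
  have h3 : ((n:Int) - (L:Int) % n) = (((n - L % n : Nat)) : Int) := by omega
  rw [h3]
  norm_cast

theorem encipher_spec : Claim_equal_encipher := by
  intro plaintext group_length d _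
  unfold Spec_encipher encipher encipher_alt
  set n := group_length.natAbs with hn_def
  set t0 := plaintext.toList ++ "STOP".toList with ht0
  by_cases hn0 : n = 0
  · simp only [hn0, ne_eq, not_true_eq_false, if_false]
    rw [pvSubst_eq]
    simp
  · have hn : 0 < n := Nat.pos_of_ne_zero hn0
    simp only [ne_eq, hn0, not_false_eq_true, if_true]
    -- the two padded texts coincide
    have hpadcount : (PySem.Int.mod (-(t0.length : Int)) n).toNat = (n - t0.length % n) % n :=
      pvPad_eq n t0.length hn
    have hpad :
        (if t0.length % n ≠ 0 then t0 ++ List.replicate (n - t0.length % n) ' ' else t0)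
          = t0 ++ List.replicate ((PySem.Int.mod (-(t0.length : Int)) n).toNat) ' ' := by
      rw [hpadcount]
      by_cases hr : t0.length % n = 0
      · rw [if_neg (by simp [hr])]
        have : (n - t0.length % n) % n = 0 := by rw [hr, Nat.sub_zero, Nat.mod_self]
        rw [this]; simp
      · rw [if_pos hr]
        have hlt : n - t0.length % n < n := by
          have := Nat.mod_lt t0.length hn
          omega
        rw [Nat.mod_eq_of_lt hlt]
    rw [← hpad]
    set t1 := (if t0.length % n ≠ 0 then t0 ++ List.replicate (n - t0.length % n) ' ' else t0)
      with ht1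
    -- padded length is an exact multiple of n
    have hdvd : ∃ m, t1.length = m * n := by
      rw [ht1]
      by_cases hr : t0.length % n = 0
      · rw [if_neg (by simp [hr])]
        exact ⟨t0.length / n, (Nat.div_mul_cancel (Nat.dvd_of_mod_eq_zero hr)).symm⟩
      · rw [if_pos hr]
        refine ⟨t0.length / n + 1, ?_⟩
        have h1 : t0.length % n < n := Nat.mod_lt _ hn
        have h2 : n * (t0.length / n) + t0.length % n = t0.length := Nat.div_add_mod _ _
        have h3 : (t0.length / n + 1) * n = n * (t0.length / n) + n := by ring
        simp only [List.length_append, List.length_replicate]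
        omega
    obtain ⟨m, hm⟩ := hdvd
    rw [pvFold_groups n hn m t1 hm []]
    simp only [List.nil_append]
    rw [pvReverseGroups_eq]
    rw [pvSlices_eq n hn m t1 hm, pvSubst_eq]
    simp
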